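-- pv_equiv track=rewrite | github.com/nicoleathy/graded-metacognition | esma/reward.py | esma_reward
-- ===== SOURCE A (Python) =====
-- def esma_reward(direct_correctness: list[int], meta_yes: list[int]) -> list[int]:
--     rewards = []
--     for correct, yes in zip(direct_correctness, meta_yes):
--         if correct == yes:
--             if correct:
--                 rewards.append(2)
--             else:
--                 rewards.append(1)
--         else:
--             if correct:
--                 rewards.append(1)
--             else:
--                 rewards.append(0)
--     return rewards
-- ===== SOURCE B (Python) =====
-- def esma_reward(direct_correctness: list[int], meta_yes: list[int]) -> list[int]:
--     # Staged passes instead of one branching loop: build a correctness-score list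
--     # and an agreement-score list separately, then sum them index-wise.
--     n = min(len(direct_correctness), len(meta_yes))
--     base = [1 if direct_correctness[i] else 0 for i in range(n)]
--     agree = [1 if direct_correctness[i] == meta_yes[i] else 0 for i in range(n)]
--     return [b + a for b, a in zip(base, agree)]
-- ===== Notes on version B (the rewrite author's own statement) =====
-- stated objective: alternative
-- what changed: Replaces A's single branching accumulator loop over zip with three staged passes: an index-based pass building a correctness-indicator list, a second pass building an agreement-indicator list, and a final pass summing the two lists element-wise.
import Mathlib
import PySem

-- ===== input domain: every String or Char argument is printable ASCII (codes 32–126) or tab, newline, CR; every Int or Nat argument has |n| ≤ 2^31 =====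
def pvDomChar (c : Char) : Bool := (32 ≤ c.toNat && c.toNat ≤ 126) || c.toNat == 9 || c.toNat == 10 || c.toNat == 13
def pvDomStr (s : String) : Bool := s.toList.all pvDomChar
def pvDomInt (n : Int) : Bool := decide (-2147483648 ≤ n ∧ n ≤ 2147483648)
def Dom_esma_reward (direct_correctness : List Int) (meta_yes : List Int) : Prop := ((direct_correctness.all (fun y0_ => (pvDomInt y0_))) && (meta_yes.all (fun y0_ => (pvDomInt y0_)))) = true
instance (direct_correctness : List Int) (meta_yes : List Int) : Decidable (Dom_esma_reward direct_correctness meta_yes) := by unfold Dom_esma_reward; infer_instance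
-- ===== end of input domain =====

-- ===== PORT A =====
-- B builds the result in three staged passes (correctness indicators, agreement
-- indicators, element-wise sum) instead of A's single branching accumulator loop.
def esma_reward_loop : List (Int × Int) → List Int → List Int
  | [], rewards => rewards
  | (correct, yes) :: rest, rewards =>
      if correct == yes then
        if correct != 0 then esma_reward_loop rest (rewards ++ [2])
        else esma_reward_loop rest (rewards ++ [1])
      else
        if correct != 0 then esma_reward_loop rest (rewards ++ [1])
        else esma_reward_loop rest (rewards ++ [0])

def esma_reward (direct_correctness : List Int) (meta_yes : List Int) : List Int :=
  esma_reward_loop (direct_correctness.zip meta_yes) []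

-- ===== PORT B =====
-- indexing direct_correctness[i] / meta_yes[i] for i < n is in range, so getD is exact
def esma_reward_alt (direct_correctness : List Int) (meta_yes : List Int) : List Int :=
  let n := min direct_correctness.length meta_yes.length
  let base := (List.range n).map (fun i => if direct_correctness.getD i 0 ≠ 0 then (1 : Int) else 0)
  let agree := (List.range n).map (fun i => if direct_correctness.getD i 0 = meta_yes.getD i 0 then (1 : Int) else 0)
  (base.zip agree).map (fun p => p.1 + p.2)

-- ===== PRECONDITION & SPEC =====
def Spec_esma_reward (direct_correctness : List Int) (meta_yes : List Int) (out : List Int) : Prop := out = esma_reward_alt direct_correctness meta_yes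
instance (direct_correctness : List Int) (meta_yes : List Int) (out : List Int) : Decidable (Spec_esma_reward direct_correctness meta_yes out) := by unfold Spec_esma_reward; infer_instance

-- ===== CLAIM (what is proved, stated in full; the proofs are below) =====
def Claim_equal_esma_reward : Prop := ∀ (direct_correctness : List Int) (meta_yes : List Int), Dom_esma_reward direct_correctness meta_yes → Spec_esma_reward direct_correctness meta_yes (esma_reward direct_correctness meta_yes)

-- ===== LEMMAS AND PROOFS =====
theorem esma_reward_loop_eq (l : List (Int × Int)) (acc : List Int) :
    esma_reward_loop l acc =
      acc ++ l.map (fun p => (if p.1 ≠ 0 then (1 : Int) else 0) + (if p.1 = p.2 then 1 else 0)) := by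
  induction l generalizing acc with
  | nil => simp [esma_reward_loop]
  | cons p rest ih =>
    obtain ⟨c, y⟩ := p
    simp only [esma_reward_loop, List.map_cons]
    by_cases h1 : c = y
    · subst h1
      by_cases h2 : c = 0 <;> simp [h2, ih, bne]
    · by_cases h2 : c = 0
      · subst h2; simp [ih, bne, h1]
      · simp [h1, h2, ih, bne]

-- ===== VERDICT (by name: the statement is the Claim_ definition above) =====
theorem esma_reward_spec : Claim_equal_esma_reward := by
  intro dc my _
  unfold Spec_esma_reward esma_reward esma_reward_alt
  rw [esma_reward_loop_eq]
  apply List.ext_getElem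
  · simp
  · intro i h1 h2
    simp only [List.nil_append, List.getElem_map, List.getElem_zip, List.getElem_range]
    have hi : i < min dc.length my.length := by simpa using h2
    have hd : i < dc.length := lt_of_lt_of_le hi (by omega)
    have hm : i < my.length := lt_of_lt_of_le hi (by omega)
    simp [List.getD, hd, hm]
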